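-- pv_equiv track=rewrite | github.com/loadingsjy/algorithm | HuaWei/log.py | cal_max_score
-- ===== SOURCE A (Python) =====
-- def cal_pre_sum(arr):
--     '''计算前缀和'''
--     n = len(arr)
--     pre_sum = [0] * (n + 1)
--     for i in range(1, n + 1):
--         pre_sum[i] = pre_sum[i - 1] + arr[i - 1]
--     return pre_sum
--
-- def cal_max_score(logs):
--     max_score = 0
--     pre_sum = cal_pre_sum(logs)
--     pre_sum_pre_sum = cal_pre_sum(pre_sum)
--
--     for i in range(len(pre_sum)):
--         max_score = max(max_score, pre_sum[i]-pre_sum_pre_sum[i])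
--         if pre_sum[i] >= 100:
--             break
--     return max_score
-- ===== SOURCE B (Python) =====
-- def cal_max_score(logs):
--     max_score = 0
--     s = 0   # running prefix sum of logs
--     ss = 0  # running sum of the prefix sums
--     for i in range(len(logs) + 1):
--         if s - ss > max_score:
--             max_score = s - ss
--         if s >= 100:
--             break
--         ss += s
--         if i < len(logs):
--             s += logs[i]
--     return max_score
-- ===== Notes on version B (the rewrite author's own statement) =====
-- stated objective: faster
-- what changed: Replaces the two materialized prefix-sum arrays (cal_pre_sum called twice) and the index loop by one streaming pass with two running accumulators s and ss, so no helper and no O(n) arrays are built.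
import Mathlib
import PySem

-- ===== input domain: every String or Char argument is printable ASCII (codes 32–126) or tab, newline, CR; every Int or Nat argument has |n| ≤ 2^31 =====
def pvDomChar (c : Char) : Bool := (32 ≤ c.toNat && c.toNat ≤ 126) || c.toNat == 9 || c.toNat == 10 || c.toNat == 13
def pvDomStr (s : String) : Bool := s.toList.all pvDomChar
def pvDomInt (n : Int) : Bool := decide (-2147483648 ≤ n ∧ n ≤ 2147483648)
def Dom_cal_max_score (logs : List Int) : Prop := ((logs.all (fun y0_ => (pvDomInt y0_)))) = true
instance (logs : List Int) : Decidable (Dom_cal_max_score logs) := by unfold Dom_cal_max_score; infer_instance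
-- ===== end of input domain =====

-- B replaces the two materialized prefix-sum arrays and cal_pre_sum by one streaming pass
-- with two running accumulators (simpler: O(1) extra space, no helper arrays).


-- ===== PORT A =====
-- cal_pre_sum: pre_sum[i] = pre_sum[i-1] + arr[i-1], built left to right (indices shifted to 0-based)
def cal_pre_sum (arr : List Int) : List Int :=
  (List.range arr.length).foldl
    (fun pre_sum i => pre_sum ++ [pre_sum.getD i 0 + arr.getD i 0]) [0]

-- the 'for i in range(len(pre_sum)) … break' loop of A
def calLoopA (ps pps : List Int) (i : Nat) (m : Int) : Int :=
  if _h : i < ps.length then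
    let m' := max m (ps.getD i 0 - pps.getD i 0)
    if ps.getD i 0 ≥ 100 then m' else calLoopA ps pps (i + 1) m'
  else m
termination_by ps.length - i

def cal_max_score (logs : List Int) : Int :=
  calLoopA (cal_pre_sum logs) (cal_pre_sum (cal_pre_sum logs)) 0 0

-- ===== PORT B =====
-- B's single streaming pass: s = running sum of logs, ss = running sum of the s values
def calLoopB : List Int → Int → Int → Int → Int
  | rest, s, ss, m =>
    let m' := if s - ss > m then s - ss else m
    if s ≥ 100 then m'
    else
      match rest with
      | [] => m'
      | x :: xs => calLoopB xs (s + x) (ss + s) m'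

def cal_max_score_alt (logs : List Int) : Int := calLoopB logs 0 0 0

-- ===== PRECONDITION & SPEC =====
def Spec_cal_max_score (logs : List Int) (out : Int) : Prop := out = cal_max_score_alt logs
instance (logs : List Int) (out : Int) : Decidable (Spec_cal_max_score logs out) := by unfold Spec_cal_max_score; infer_instance

-- ===== CLAIM (what is proved, stated in full; the proofs are below) =====
def Claim_equal_cal_max_score : Prop := ∀ (logs : List Int), Dom_cal_max_score logs → Spec_cal_max_score logs (cal_max_score logs)

-- ===== LEMMAS AND PROOFS =====

-- prefix-sum value at index i
def pvT (logs : List Int) (i : Nat) : Int := ((logs.take i).sum)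
-- sum of the prefix sums below i
def pvS (logs : List Int) (i : Nat) : Int := (((List.range i).map (pvT logs)).sum)

theorem calLoopA_unfold (ps pps : List Int) (i : Nat) (m : Int) :
    calLoopA ps pps i m =
      if i < ps.length then
        (if ps.getD i 0 ≥ 100 then max m (ps.getD i 0 - pps.getD i 0)
         else calLoopA ps pps (i + 1) (max m (ps.getD i 0 - pps.getD i 0)))
      else m := by
  rw [calLoopA]
  by_cases h : i < ps.length <;> simp [h]

theorem calLoopB_unfold (rest : List Int) (s ss m : Int) :
    calLoopB rest s ss m =
      if s ≥ 100 then (if s - ss > m then s - ss else m)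
      else
        match rest with
        | [] => (if s - ss > m then s - ss else m)
        | x :: xs => calLoopB xs (s + x) (ss + s) (if s - ss > m then s - ss else m) := by
  cases rest <;> rw [calLoopB]

theorem cal_pre_sum_eq (arr : List Int) :
    cal_pre_sum arr = (List.range (arr.length + 1)).map (pvT arr) := by
  unfold cal_pre_sum
  suffices h : ∀ k, k ≤ arr.length →
      (List.range k).foldl (fun pre_sum i => pre_sum ++ [pre_sum.getD i 0 + arr.getD i 0]) [0]
        = (List.range (k + 1)).map (pvT arr) by
    exact h arr.length le_rfl
  intro k hk
  induction k with
  | zero => simp [pvT]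
  | succ k ih =>
    have hk' : k ≤ arr.length := Nat.le_of_succ_le hk
    rw [List.range_succ, List.foldl_append, ih hk']
    have hT : pvT arr (k + 1) = pvT arr k + arr.getD k 0 := by
      have hklt : k < arr.length := hk
      unfold pvT
      rw [List.take_add_one, List.sum_append, List.getD_eq_getElem?_getD,
        List.getElem?_eq_getElem hklt]
      simp
    rw [List.range_succ (n := k + 1), List.map_append]
    simp [hT]

theorem ps_getD (logs : List Int) (i : Nat) (hi : i ≤ logs.length) :
    (cal_pre_sum logs).getD i 0 = pvT logs i := by
  rw [cal_pre_sum_eq, List.getD_eq_getElem?_getD]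
  simp [Nat.lt_succ_of_le hi]

theorem ps_length (logs : List Int) : (cal_pre_sum logs).length = logs.length + 1 := by
  rw [cal_pre_sum_eq]; simp

theorem pps_getD (logs : List Int) (i : Nat) (hi : i ≤ logs.length) :
    (cal_pre_sum (cal_pre_sum logs)).getD i 0 = pvS logs i := by
  have hlen : i ≤ (cal_pre_sum logs).length := by rw [ps_length]; omega
  rw [ps_getD _ _ hlen]
  show ((cal_pre_sum logs).take i).sum = pvS logs i
  rw [cal_pre_sum_eq, ← List.map_take, List.take_range, Nat.min_eq_left (by omega)]
  rfl

theorem max_eq_ite (m d : Int) : max m d = if d > m then d else m := by omega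

theorem loop_eq (logs : List Int) :
    ∀ (rest : List Int) (i : Nat) (m : Int), logs.drop i = rest → i ≤ logs.length →
      calLoopA (cal_pre_sum logs) (cal_pre_sum (cal_pre_sum logs)) i m
        = calLoopB rest (pvT logs i) (pvS logs i) m := by
  intro rest
  induction rest with
  | nil =>
    intro i m hdrop hi
    have hi' : i = logs.length := by
      have := List.drop_eq_nil_iff.mp hdrop; omega
    subst hi'
    rw [calLoopA_unfold, calLoopB_unfold,
      if_pos (by rw [ps_length]; omega : logs.length < (cal_pre_sum logs).length),
      ps_getD logs _ le_rfl, pps_getD logs _ le_rfl, ← max_eq_ite]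
    split
    · rfl
    · rw [calLoopA_unfold, if_neg (by rw [ps_length]; omega)]
  | cons x xs ih =>
    intro i m hdrop hi
    have hilt : i < logs.length := by
      by_contra h
      rw [List.drop_eq_nil_iff.mpr (by omega)] at hdrop
      simp at hdrop
    have hx : logs[i]? = some x := by
      have h0 : (logs.drop i)[0]? = some x := by rw [hdrop]; rfl
      rw [List.getElem?_drop] at h0
      simpa using h0
    rw [calLoopA_unfold, calLoopB_unfold,
      if_pos (by rw [ps_length]; omega : i < (cal_pre_sum logs).length),
      ps_getD logs _ (le_of_lt hilt), pps_getD logs _ (le_of_lt hilt), ← max_eq_ite]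
    split
    · rfl
    · have hdrop' : logs.drop (i + 1) = xs := by
        rw [← List.tail_drop, hdrop]; rfl
      have hT : pvT logs (i + 1) = pvT logs i + x := by
        unfold pvT
        rw [List.take_add_one, List.sum_append, hx]
        simp
      have hS : pvS logs (i + 1) = pvS logs i + pvT logs i := by
        simp [pvS, List.range_succ]
      rw [ih (i + 1) _ hdrop' (by omega), hT, hS]

-- ===== VERDICT (by name: the statement is the Claim_ definition above) =====
theorem cal_max_score_spec : Claim_equal_cal_max_score := by
  intro logs _
  unfold Spec_cal_max_score cal_max_score cal_max_score_alt
  have h := loop_eq logs logs 0 0 (by simp) (by omega)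
  have hT0 : pvT logs 0 = 0 := by simp [pvT]
  have hS0 : pvS logs 0 = 0 := by simp [pvS]
  rw [h, hT0, hS0]
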